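-- pv_equiv track=rewrite | github.com/shtoshni/fast-coref | src/data_processing/utils.py | get_sentence_map
-- ===== SOURCE A (Python) =====
-- def get_sentence_map(segments, sentence_end):
--     current = 0
--     sent_map = []
--     sent_end_idx = 0
--     assert len(sentence_end) == sum([len(s) for s in segments])
--     for segment in segments:
--         for i in range(len(segment)):
--             sent_map.append(current)
--             current += int(sentence_end[sent_end_idx])
--             sent_end_idx += 1
--     return sent_map
-- ===== SOURCE B (Python) =====
-- def get_sentence_map(segments, sentence_end):
--     assert len(sentence_end) == sum([len(s) for s in segments])
--     return [sum(sentence_end[:i]) for i in range(len(sentence_end))]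
-- ===== Notes on version B (the rewrite author's own statement) =====
-- stated objective: simpler
-- what changed: B drops the nested segment/token traversal and the three pieces of mutable running state (current, sent_map, sent_end_idx) and instead defines the i-th entry directly from the specification as sum(sentence_end[:i]), one comprehension over token positions with no accumulator.
import Mathlib
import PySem

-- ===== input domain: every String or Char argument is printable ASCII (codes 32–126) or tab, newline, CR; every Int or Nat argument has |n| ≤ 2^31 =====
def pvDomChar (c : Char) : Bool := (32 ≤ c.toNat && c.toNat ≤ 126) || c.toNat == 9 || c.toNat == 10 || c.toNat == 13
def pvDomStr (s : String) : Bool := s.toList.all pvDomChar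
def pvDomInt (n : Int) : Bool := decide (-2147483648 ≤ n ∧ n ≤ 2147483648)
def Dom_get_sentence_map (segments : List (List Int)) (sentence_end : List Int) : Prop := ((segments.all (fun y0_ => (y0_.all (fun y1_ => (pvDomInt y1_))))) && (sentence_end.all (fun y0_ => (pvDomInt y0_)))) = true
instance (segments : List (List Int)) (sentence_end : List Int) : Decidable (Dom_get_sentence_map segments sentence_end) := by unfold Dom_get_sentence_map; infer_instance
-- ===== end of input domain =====

-- B replaces A's nested segment/token loop with its three pieces of running state by a
-- direct, accumulator-free definition: entry i is sum(sentence_end[:i]) (simpler, not faster).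

-- ===== PORT A =====
-- literal transliteration: state (current, sent_map, sent_end_idx); the assert is Pre_.
def get_sentence_map (segments : List (List Int)) (sentence_end : List Int) : List Int :=
  let st : Int × List Int × Int :=
    segments.foldl
      (fun st segment =>
        (PySem.List.pyRange 0 segment.length 1).foldl
          (fun st _ =>
            (st.1 + (PySem.List.pyGet? sentence_end st.2.2).getD 0,
             st.2.1 ++ [st.1],
             st.2.2 + 1))
          st)
      (0, [], 0)
  st.2.1

-- ===== PORT B =====
-- literal transliteration of Source B: [sum(sentence_end[:i]) for i in range(len(sentence_end))]
def get_sentence_map_alt (segments : List (List Int)) (sentence_end : List Int) : List Int :=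
  (PySem.List.pyRange 0 sentence_end.length 1).map
    (fun i => (PySem.List.slice sentence_end none (some i)).sum)

-- ===== PRECONDITION & SPEC =====
-- Pre_ is exactly A's (and B's) assert: otherwise both raise AssertionError.
def Pre_get_sentence_map (segments : List (List Int)) (sentence_end : List Int) : Prop :=
  sentence_end.length = (segments.map List.length).sum
instance (segments : List (List Int)) (sentence_end : List Int) : Decidable (Pre_get_sentence_map segments sentence_end) := by unfold Pre_get_sentence_map; infer_instance
def pvWitness_get_sentence_map : List (List Int) × List Int := ([[1, 2], [3]], [1, 0, 1])

def Spec_get_sentence_map (segments : List (List Int)) (sentence_end : List Int) (out : List Int) : Prop := out = get_sentence_map_alt segments sentence_end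
instance (segments : List (List Int)) (sentence_end : List Int) (out : List Int) : Decidable (Spec_get_sentence_map segments sentence_end out) := by unfold Spec_get_sentence_map; infer_instance

-- ===== CLAIM (what is proved, stated in full; the proofs are below) =====
def Claim_equal_get_sentence_map : Prop := ∀ (segments : List (List Int)) (sentence_end : List Int), Dom_get_sentence_map segments sentence_end → Pre_get_sentence_map segments sentence_end → Spec_get_sentence_map segments sentence_end (get_sentence_map segments sentence_end)

-- ===== LEMMAS AND PROOFS =====

-- A's single loop-body step on the state (current, sent_map, sent_end_idx)
def pvStep (l : List Int) (st : Int × List Int × Int) : Int × List Int × Int :=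
  (st.1 + (PySem.List.pyGet? l st.2.2).getD 0, st.2.1 ++ [st.1], st.2.2 + 1)

-- exclusive prefix sums starting from c (characterises A's emitted list)
def pvEx (c : Int) : List Int → List Int
  | [] => []
  | x :: xs => c :: pvEx (c + x) xs

theorem pv_inner (l : List Int) (m : Nat) (st : Int × List Int × Int) :
    (PySem.List.pyRange 0 m 1).foldl
      (fun st (_ : Int) =>
        (st.1 + (PySem.List.pyGet? l st.2.2).getD 0, st.2.1 ++ [st.1], st.2.2 + 1)) st
      = (pvStep l)^[m] st := by
  induction m generalizing st with
  | zero => simp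
  | succ m ih =>
      rw [show ((m + 1 : Nat) : Int) = (m : Int) + 1 from by push_cast; ring,
          PySem.List.pyRange_one_succ_right (Int.natCast_nonneg m)]
      rw [List.foldl_append, ih, Function.iterate_succ_apply']
      rfl

theorem pv_nested (l : List Int) (segs : List (List Int)) (st : Int × List Int × Int) :
    segs.foldl
      (fun st segment =>
        (PySem.List.pyRange 0 segment.length 1).foldl
          (fun st (_ : Int) =>
            (st.1 + (PySem.List.pyGet? l st.2.2).getD 0, st.2.1 ++ [st.1], st.2.2 + 1)) st) st
      = (pvStep l)^[(segs.map List.length).sum] st := by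
  induction segs generalizing st with
  | nil => simp
  | cons s ss ih =>
      simp only [List.foldl_cons, List.map_cons, List.sum_cons]
      rw [pv_inner, ih, Nat.add_comm, Function.iterate_add_apply]

theorem pv_iter (l : List Int) (n : Nat) :
    ∀ (idx : Nat) (c : Int) (sm : List Int), idx + n ≤ l.length →
    (pvStep l)^[n] (c, sm, (idx : Int))
      = (c + ((l.drop idx).take n).sum,
         sm ++ pvEx c ((l.drop idx).take n),
         ((idx + n : Nat) : Int)) := by
  induction n with
  | zero => intro idx c sm _; simp [pvEx]
  | succ n ih =>
      intro idx c sm h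
      have hidx : idx < l.length := by omega
      have hdrop : l.drop idx = l[idx] :: l.drop (idx + 1) :=
        List.drop_eq_getElem_cons hidx
      rw [Function.iterate_succ_apply]
      have hstep : pvStep l (c, sm, (idx : Int))
          = (c + l[idx], sm ++ [c], ((idx + 1 : Nat) : Int)) := by
        simp [pvStep, PySem.List.pyGet?_natCast, List.getElem?_eq_getElem hidx]
      rw [hstep, ih (idx + 1) (c + l[idx]) (sm ++ [c]) (by omega)]
      rw [hdrop, List.take_succ_cons]
      simp only [pvEx, List.sum_cons, Prod.mk.injEq]
      refine ⟨by ring, by simp, ?_⟩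
      exact congrArg _ (by omega)

-- B's comprehension computes exactly the exclusive prefix sums
theorem pv_map_eq_pvEx (l : List Int) : ∀ c : Int,
    (List.range l.length).map (fun i => c + (l.take i).sum) = pvEx c l := by
  induction l with
  | nil => intro c; simp [pvEx]
  | cons x xs ih =>
      intro c
      simp only [List.length_cons]
      rw [List.range_succ_eq_map, List.map_cons, List.map_map]
      simp only [pvEx, List.take_zero, List.sum_nil, add_zero, List.cons.injEq,
        Function.comp_def, List.take_succ_cons, List.sum_cons]
      refine ⟨trivial, ?_⟩
      rw [← ih (c + x)]
      exact List.map_congr_left (fun i _ => by ring)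

theorem pv_alt_eq (segs : List (List Int)) (l : List Int) :
    get_sentence_map_alt segs l = pvEx 0 l := by
  unfold get_sentence_map_alt
  rw [show (l.length : Int) = ((l.length : Nat) : Int) from rfl,
      PySem.List.pyRange_zero_natCast, List.map_map]
  have : ∀ i ∈ List.range l.length,
      ((fun i => (PySem.List.slice l none (some i)).sum) ∘ (fun k : Nat => (k : Int))) i
        = (fun i => (0 : Int) + (l.take i).sum) i := by
    intro i _
    simp [PySem.List.slice_to_natCast]
  rw [List.map_congr_left this, pv_map_eq_pvEx]

-- ===== VERDICT (by name: the statement is the Claim_ definition above) =====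
theorem get_sentence_map_spec : Claim_equal_get_sentence_map := by
  intro segments sentence_end _ hpre
  unfold Pre_get_sentence_map at hpre
  unfold Spec_get_sentence_map get_sentence_map
  rw [pv_alt_eq]
  simp only [pv_nested]
  have hiter := pv_iter sentence_end ((segments.map List.length).sum) 0 0 [] (by omega)
  simp only [Nat.cast_zero, List.drop_zero] at hiter
  rw [hiter, List.take_of_length_le hpre.le]
  simp
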